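-- pv_equiv track=rewrite | github.com/yanz4/CS-512-Data-Mining-Project | egoset/extractFSGFeatures.py | getSkipgrams
-- ===== SOURCE A (Python) =====
-- def getSkipgrams(tokens, location):
--     cleaned_tokens = []
--     for tok in tokens:
--         if tok == "\t":
--             cleaned_tokens.append("TAB")
--         else:
--             cleaned_tokens.append(tok)
--     positions = [(-1, 1), (-2, 1), (-1, 2), (-3, 1), (-1, 3), (-2, 2)]
--     skipgrams = []
--     for pos in positions:
--         sg = ' '.join(cleaned_tokens[location+pos[0]:location]) + ' __ ' + ' '.join(cleaned_tokens[location+1:location+1+pos[1]])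
--
--         skipgrams.append(sg)
--     return skipgrams
-- ===== SOURCE B (Python) =====
-- def getSkipgrams(tokens, location):
--     # Direct index arithmetic: normalize/clamp the six slice bounds the way Python
--     # slicing does, then build each segment string by recursive concatenation over
--     # the at-most-3 needed indices (cleaning tabs at access time) -- no full
--     # cleaning pass, no intermediate lists, no slicing/join.
--     n = len(tokens)
--
--     def clamp(i):
--         if i < 0:
--             i += n
--         return 0 if i < 0 else (n if i > n else i)
--
--     def seg(i, stop):
--         # joined cleaned tokens[i:stop] for already-clamped 0 <= i, stop <= n
--         if stop <= i:
--             return ''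
--         t = 'TAB' if tokens[i] == '\t' else tokens[i]
--         return t if i + 1 == stop else t + ' ' + seg(i + 1, stop)
--
--     def piece(a, b):
--         return seg(clamp(a), clamp(b))
--
--     l1 = piece(location - 1, location)
--     l2 = piece(location - 2, location)
--     l3 = piece(location - 3, location)
--     r1 = piece(location + 1, location + 2)
--     r2 = piece(location + 1, location + 3)
--     r3 = piece(location + 1, location + 4)
--     return [l1 + ' __ ' + r1, l2 + ' __ ' + r1, l1 + ' __ ' + r2,
--             l3 + ' __ ' + r1, l1 + ' __ ' + r3, l2 + ' __ ' + r2]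
-- ===== Notes on version B (the rewrite author's own statement) =====
-- stated objective: alternative
-- what changed: B replaces A's full cleaning pass over all tokens plus six slice-and-join passes with direct Python-style bound clamping and a recursive string builder that touches only the at most 6 tokens around location, cleaning each at access time and computing each distinct segment once; intended as asymptotically lighter (O(1) token accesses vs A's O(n) pass), measured 1.57x at the largest size but not consistently >=1.5x.
import Mathlib
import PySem

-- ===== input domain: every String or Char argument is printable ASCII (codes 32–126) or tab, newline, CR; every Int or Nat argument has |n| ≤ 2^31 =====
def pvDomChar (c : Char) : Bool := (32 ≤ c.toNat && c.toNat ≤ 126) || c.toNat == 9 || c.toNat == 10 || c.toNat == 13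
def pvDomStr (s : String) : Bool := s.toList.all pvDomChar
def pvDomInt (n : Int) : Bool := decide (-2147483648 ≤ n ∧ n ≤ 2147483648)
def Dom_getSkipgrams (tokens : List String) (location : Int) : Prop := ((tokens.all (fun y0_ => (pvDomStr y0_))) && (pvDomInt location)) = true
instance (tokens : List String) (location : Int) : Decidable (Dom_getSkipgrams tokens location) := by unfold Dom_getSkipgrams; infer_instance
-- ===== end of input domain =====

-- B replaces A's full cleaning pass plus six slice-and-joins by direct clamped index
-- arithmetic and a recursive string builder over the at most 6 tokens near `location`
-- (an alternative that avoids the whole-list pass; not measured consistently faster).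

-- ===== PORT A =====
def getSkipgrams (tokens : List String) (location : Int) : List String :=
  -- cleaned_tokens = []; for tok in tokens: append "TAB" or tok
  let cleaned := tokens.foldl (fun acc tok => acc ++ [if tok == "\t" then "TAB" else tok]) []
  let positions : List (Int × Int) := [(-1, 1), (-2, 1), (-1, 2), (-3, 1), (-1, 3), (-2, 2)]
  -- skipgrams = []; for pos in positions: append the joined slices glued by ' __ '
  positions.foldl (fun skipgrams pos =>
    skipgrams ++
      [PySem.Str.join " " (PySem.List.slice cleaned (some (location + pos.1)) (some location))
        ++ " __ " ++
       PySem.Str.join " " (PySem.List.slice cleaned (some (location + 1)) (some (location + 1 + pos.2)))])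
    []

-- ===== PORT B =====
-- def clamp(i): if i < 0: i += n; return 0 if i < 0 else (n if i > n else i)
def pvClamp (n : Nat) (i : Int) : Nat :=
  let j := if i < 0 then i + n else i
  if j < 0 then 0 else if (n : Int) < j then n else j.toNat

-- def seg(i, stop): recursive join of the cleaned tokens[i:stop], bounds pre-clamped
-- (tokens[i] is exact as getD: seg only reads 0 ≤ i < stop ≤ len(tokens))
def pvSeg (tokens : List String) (i stop : Nat) : String :=
  if _h : stop ≤ i then ""
  else
    let t := if tokens.getD i "" == "\t" then "TAB" else tokens.getD i ""
    if i + 1 = stop then t else t ++ " " ++ pvSeg tokens (i + 1) stop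
termination_by stop - i
decreasing_by omega

def getSkipgrams_alt (tokens : List String) (location : Int) : List String :=
  let n := tokens.length
  let piece := fun (a b : Int) => pvSeg tokens (pvClamp n a) (pvClamp n b)
  let l1 := piece (location - 1) location
  let l2 := piece (location - 2) location
  let l3 := piece (location - 3) location
  let r1 := piece (location + 1) (location + 2)
  let r2 := piece (location + 1) (location + 3)
  let r3 := piece (location + 1) (location + 4)
  [l1 ++ " __ " ++ r1, l2 ++ " __ " ++ r1, l1 ++ " __ " ++ r2,
   l3 ++ " __ " ++ r1, l1 ++ " __ " ++ r3, l2 ++ " __ " ++ r2]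

-- ===== PRECONDITION & SPEC =====
def Spec_getSkipgrams (tokens : List String) (location : Int) (out : List String) : Prop := out = getSkipgrams_alt tokens location
instance (tokens : List String) (location : Int) (out : List String) : Decidable (Spec_getSkipgrams tokens location out) := by unfold Spec_getSkipgrams; infer_instance

-- ===== CLAIM (what is proved, stated in full; the proofs are below) =====
def Claim_equal_getSkipgrams : Prop := ∀ (tokens : List String) (location : Int), Dom_getSkipgrams tokens location → Spec_getSkipgrams tokens location (getSkipgrams tokens location)

-- ===== LEMMAS AND PROOFS =====

-- B's hand-written clamp is exactly PySem's slice-bound normalization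
theorem pvClamp_eq (n : Nat) (i : Int) : pvClamp n i = PySem.List.clampIdx n i := by
  simp only [pvClamp, PySem.List.clampIdx]
  split_ifs <;> omega

theorem pv_join_nil : PySem.Str.join " " ([] : List String) = "" := rfl

theorem pv_join_one (x : String) : PySem.Str.join " " [x] = x := by
  simp [PySem.Str.join, PySem.Chars.join, List.intercalate, String.ofList_toList]

theorem pv_join_cons2 (x y : String) (r : List String) :
    PySem.Str.join " " (x :: y :: r) = x ++ " " ++ PySem.Str.join " " (y :: r) := by
  simp only [PySem.Str.join, PySem.Chars.join, List.intercalate, List.map_cons,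
    List.intersperse, List.flatten_cons, String.ofList_append, String.ofList_toList]
  rw [← String.append_assoc]

-- B's recursive segment builder computes the join of the cleaned clamped window
theorem pvSeg_eq (tokens : List String) : ∀ (k i stop : Nat), stop ≤ i + k → stop ≤ tokens.length →
    pvSeg tokens i stop =
      PySem.Str.join " " (((tokens.map (fun t => if t == "\t" then "TAB" else t)).drop i).take (stop - i)) := by
  intro k
  induction k with
  | zero =>
    intro i stop h _
    rw [pvSeg, dif_pos (by omega : stop ≤ i), show stop - i = 0 from by omega, List.take_zero, pv_join_nil]
  | succ k ih =>
    intro i stop h hl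
    rw [pvSeg]
    by_cases hsi : stop ≤ i
    · rw [dif_pos hsi, show stop - i = 0 from by omega, List.take_zero, pv_join_nil]
    · rw [dif_neg hsi]
      have hit : i < tokens.length := by omega
      have hgetD : tokens.getD i "" = tokens[i] := List.getD_eq_getElem tokens "" hit
      have him : i < (tokens.map (fun t => if t == "\t" then "TAB" else t)).length := by
        simpa using hit
      have hdrop := List.drop_eq_getElem_cons him
      have hhead : (tokens.map (fun t => if t == "\t" then "TAB" else t))[i]'him
          = (if tokens[i] == "\t" then "TAB" else tokens[i]) := by
        simp only [List.getElem_map]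
      rw [show stop - i = (stop - (i + 1)) + 1 from by omega, hdrop, List.take_succ_cons, hhead]
      by_cases hone : i + 1 = stop
      · rw [if_pos hone, show stop - (i + 1) = 0 from by omega, List.take_zero, pv_join_one, hgetD]
      · rw [if_neg hone]
        have hi1 : i + 1 < tokens.length := by omega
        have him1 : i + 1 < (tokens.map (fun t => if t == "\t" then "TAB" else t)).length := by
          simpa using hi1
        have hdrop1 := List.drop_eq_getElem_cons him1
        rw [show stop - (i + 1) = (stop - (i + 2)) + 1 from by omega, hdrop1, List.take_succ_cons,
          pv_join_cons2, ih (i + 1) stop (by omega) hl, hdrop1,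
          show stop - (i + 1) = (stop - (i + 2)) + 1 from by omega, List.take_succ_cons, hgetD]

-- the join of a cleaned slice IS B's piece(a, b)
theorem pv_piece_eq (tokens : List String) (a b : Int) :
    PySem.Str.join " " (PySem.List.slice (tokens.map (fun t => if t == "\t" then "TAB" else t)) (some a) (some b)) =
      pvSeg tokens (pvClamp tokens.length a) (pvClamp tokens.length b) := by
  rw [pvClamp_eq, pvClamp_eq]
  have hb : PySem.List.clampIdx tokens.length b ≤ tokens.length := by
    simp only [PySem.List.clampIdx]
    split_ifs <;> omega
  rw [pvSeg_eq tokens (PySem.List.clampIdx tokens.length b) _ _ (by omega) hb]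
  simp only [PySem.List.slice, List.length_map]

-- ===== VERDICT (by name: the statement is the Claim_ definition above) =====
theorem getSkipgrams_spec : Claim_equal_getSkipgrams := by
  intro tokens location _
  unfold Spec_getSkipgrams getSkipgrams getSkipgrams_alt
  simp only [PySem.List.foldl_append_singleton_eq_map, List.nil_append, List.map_cons, List.map_nil]
  simp only [pv_piece_eq]
  ring_nf
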